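-- pv_equiv track=rewrite | github.com/keshapou/code-killer-obfuscator | transform.py | __add_depth__
-- ===== SOURCE A (Python) =====
-- def __add_depth__(data):
--     new_data = ''
--     scopes_number = 10
--     for i in data:
--         if i == '{':
--             new_data += i * scopes_number + '\n'
--         elif i == '}':
--             new_data += i * scopes_number + '\n'
--         else:
--             new_data += i
--
--     return new_data
-- ===== SOURCE B (Python) =====
-- def __add_depth__(data):
--     # two sequential bulk substitutions instead of a per-character loop;
--     # the first pass introduces only '{' and '\n', never '}', so the
--     # second pass expands exactly the original '}' characters
--     data = data.replace('{', '{' * 10 + '\n')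
--     data = data.replace('}', '}' * 10 + '\n')
--     return data
-- ===== Notes on version B (the rewrite author's own statement) =====
-- stated objective: idiomatic
-- what changed: Replaced the manual per-character accumulation loop by two sequential bulk str.replace passes (one for '{', one for '}').
import Mathlib
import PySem

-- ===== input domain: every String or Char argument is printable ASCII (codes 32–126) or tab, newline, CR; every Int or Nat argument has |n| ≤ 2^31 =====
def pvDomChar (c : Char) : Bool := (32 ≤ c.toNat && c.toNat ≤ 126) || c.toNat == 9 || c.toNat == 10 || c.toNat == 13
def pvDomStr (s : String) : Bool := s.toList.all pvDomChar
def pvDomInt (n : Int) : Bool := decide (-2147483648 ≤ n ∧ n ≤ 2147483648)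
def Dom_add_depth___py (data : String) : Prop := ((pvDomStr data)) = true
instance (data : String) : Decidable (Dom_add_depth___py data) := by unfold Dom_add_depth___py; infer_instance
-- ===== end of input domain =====

-- B replaces A's per-character accumulation loop by two sequential bulk str.replace passes (idiomatic; return value only).


-- ===== PORT A =====
-- literal transliteration: accumulate new_data character by character
def add_depth___py (data : String) : String :=
  let scopes_number : Int := 10
  String.ofList (data.toList.foldl (fun new_data i =>
    if i = '{' then new_data ++ (PySem.List.pyRepeat [i] scopes_number ++ ['\n'])
    else if i = '}' then new_data ++ (PySem.List.pyRepeat [i] scopes_number ++ ['\n'])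
    else new_data ++ [i]) [])

-- ===== PORT B =====
-- two sequential bulk replace passes (Source B)
def add_depth___py_alt (data : String) : String :=
  let data1 := PySem.Str.replace data "{" "{{{{{{{{{{\n"
  PySem.Str.replace data1 "}" "}}}}}}}}}}\n"

-- ===== PRECONDITION & SPEC =====
def Spec_add_depth___py (data : String) (out : String) : Prop := out = add_depth___py_alt data
instance (data : String) (out : String) : Decidable (Spec_add_depth___py data out) := by unfold Spec_add_depth___py; infer_instance

-- ===== CLAIM (what is proved, stated in full; the proofs are below) =====
def Claim_equal_add_depth___py : Prop := ∀ (data : String), Dom_add_depth___py data → Spec_add_depth___py data (add_depth___py data)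

-- ===== LEMMAS AND PROOFS =====

-- replace with a single-character pattern is a flatMap over the characters
theorem replace_go_single (o : Char) (new : List Char) (s : List Char) :
    ∀ (fuel : Nat) (acc : List Char), s.length ≤ fuel →
      PySem.Chars.replace.go [o] new fuel s acc
        = acc.reverse ++ s.flatMap (fun c => if c = o then new else [c]) := by
  induction s with
  | nil =>
      intro fuel acc _
      cases fuel <;> simp [PySem.Chars.replace.go]
  | cons c t ih =>
      intro fuel acc h
      cases fuel with
      | zero => simp at h
      | succ f =>
        by_cases hc : c = o
        · subst hc
          simp [PySem.Chars.replace.go, List.isPrefixOf, ih f (new.reverse ++ acc) (by simpa using h)]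
        · have hpre : ([o].isPrefixOf (c :: t)) = false := by
            simp [List.isPrefixOf]
            exact fun h' => (hc h'.symm).elim
          simp [PySem.Chars.replace.go, hpre, hc, ih f (c :: acc) (by simpa using h)]

theorem replace_single (s : List Char) (o : Char) (new : List Char) :
    PySem.Chars.replace s [o] new = s.flatMap (fun c => if c = o then new else [c]) := by
  simpa [PySem.Chars.replace] using replace_go_single o new s s.length [] le_rfl

theorem add_depth_list_eq (s : List Char) :
    s.foldl (fun new_data i =>
      if i = '{' then new_data ++ (PySem.List.pyRepeat [i] 10 ++ ['\n'])
      else if i = '}' then new_data ++ (PySem.List.pyRepeat [i] 10 ++ ['\n'])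
      else new_data ++ [i]) []
    = PySem.Chars.replace (PySem.Chars.replace s ['{'] ("{{{{{{{{{{\n".toList))
        ['}'] ("}}}}}}}}}}\n".toList) := by
  have hfun : (fun (new_data : List Char) (i : Char) =>
      if i = '{' then new_data ++ (PySem.List.pyRepeat [i] 10 ++ ['\n'])
      else if i = '}' then new_data ++ (PySem.List.pyRepeat [i] 10 ++ ['\n'])
      else new_data ++ [i])
    = (fun new_data i => new_data ++
        (if i = '{' then PySem.List.pyRepeat [i] 10 ++ ['\n']
         else if i = '}' then PySem.List.pyRepeat [i] 10 ++ ['\n']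
         else [i])) := by
    funext a i; split_ifs <;> rfl
  rw [hfun, replace_single, replace_single, List.flatMap_assoc,
      PySem.List.foldl_append_eq_flatMap]
  apply List.flatMap_congr
  intro c _
  by_cases h1 : c = '{'
  · subst h1; decide
  · by_cases h2 : c = '}'
    · subst h2; decide
    · simp [h1, h2]

-- ===== VERDICT (by name: the statement is the Claim_ definition above) =====
theorem add_depth___py_spec : Claim_equal_add_depth___py := by
  intro data _
  show add_depth___py data = add_depth___py_alt data
  have h := add_depth_list_eq data.toList
  apply String.toList_injective
  simp only [add_depth___py, add_depth___py_alt]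
  simpa using h
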